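-- pv_equiv track=rewrite | github.com/slavonnet/EasyIR | custom_components/easyir/assistants/pilot_lg.py | lg_pilot_guided_pairing_verdict
-- ===== SOURCE A (Python) =====
-- from typing import Any, Final, Literal
--
-- _GUIDED_YES: Final[int] = 350
--
-- _GUIDED_NO: Final[int] = -260
--
-- _GUIDED_SKIP: Final[int] = 0
--
-- _GUIDED_ACCEPT_AT: Final[int] = 700
--
-- _GUIDED_REJECT_AT: Final[int] = -520
--
-- GuidedPairingVerdict = Literal["accept", "reject", "inconclusive"]
--
-- def lg_pilot_guided_pairing_verdict(
--     responses: dict[str, str],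
-- ) -> tuple[int, GuidedPairingVerdict]:
--     """Score user feedback per probe id; unknown feedback counts as skip.
--
--     Returns (aggregate_score, verdict).
--     """
--     total = 0
--     for _probe_id, raw in responses.items():
--         key = str(raw).strip().lower()
--         if key == "yes":
--             total += _GUIDED_YES
--         elif key == "no":
--             total += _GUIDED_NO
--         elif key == "skip":
--             total += _GUIDED_SKIP
--         else:
--             total += _GUIDED_SKIP
--
--     if total >= _GUIDED_ACCEPT_AT:
--         return total, "accept"
--     if total <= _GUIDED_REJECT_AT:
--         return total, "reject"
--     return total, "inconclusive"
-- ===== SOURCE B (Python) =====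
-- from collections import Counter
--
-- _GUIDED_YES = 350
-- _GUIDED_NO = -260
-- _GUIDED_ACCEPT_AT = 700
-- _GUIDED_REJECT_AT = -520
--
--
-- def lg_pilot_guided_pairing_verdict(responses):
--     counts = Counter(str(raw).strip().lower() for raw in responses.values())
--     total = counts["yes"] * _GUIDED_YES + counts["no"] * _GUIDED_NO
--     if total >= _GUIDED_ACCEPT_AT:
--         return total, "accept"
--     if total <= _GUIDED_REJECT_AT:
--         return total, "reject"
--     return total, "inconclusive"
-- ===== Notes on version B (the rewrite author's own statement) =====
-- stated objective: simpler
-- what changed: Replaced the per-item branch-and-accumulate loop with a Counter tally of normalized values and a closed-form combination of the yes and no tallies with their weights, since skip and unknown values score nothing.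
import Mathlib
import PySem

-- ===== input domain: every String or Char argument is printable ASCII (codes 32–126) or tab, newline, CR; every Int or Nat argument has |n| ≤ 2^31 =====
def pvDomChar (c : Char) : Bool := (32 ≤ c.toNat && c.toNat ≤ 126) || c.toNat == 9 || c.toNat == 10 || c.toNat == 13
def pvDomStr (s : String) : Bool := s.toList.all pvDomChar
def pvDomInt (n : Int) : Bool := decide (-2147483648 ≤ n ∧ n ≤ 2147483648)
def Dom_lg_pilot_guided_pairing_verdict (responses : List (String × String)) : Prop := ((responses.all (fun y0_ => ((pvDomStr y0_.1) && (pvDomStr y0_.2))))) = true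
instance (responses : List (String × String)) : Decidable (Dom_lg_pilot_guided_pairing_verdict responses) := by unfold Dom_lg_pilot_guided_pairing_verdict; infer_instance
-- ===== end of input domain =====

-- B replaces A's per-item branch accumulation with a tally of normalized values plus a
-- closed-form score (objective: simpler). Equivalence proved on the whole domain.

-- ===== PORT A =====
-- literal port of A: iterate items, branch on the normalized value, accumulate total
def lg_pilot_guided_pairing_verdict (responses : List (String × String)) : Int × String :=
  let total : Int := responses.foldl (fun total p =>
    let key := PySem.Str.lower (PySem.Str.strip p.2)
    if key = "yes" then total + 350
    else if key = "no" then total + (-260)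
    else if key = "skip" then total + 0
    else total + 0) 0
  if total ≥ 700 then (total, "accept")
  else if total ≤ -520 then (total, "reject")
  else (total, "inconclusive")

-- ===== PORT B =====
-- port of B: Counter over normalized values (Counter lookup = count of the key), closed-form total
def lg_pilot_guided_pairing_verdict_alt (responses : List (String × String)) : Int × String :=
  let keys := responses.map (fun p => PySem.Str.lower (PySem.Str.strip p.2))
  let total : Int := (keys.count "yes" : Int) * 350 + (keys.count "no" : Int) * (-260)
  if total ≥ 700 then (total, "accept")
  else if total ≤ -520 then (total, "reject")
  else (total, "inconclusive")

-- ===== PRECONDITION & SPEC =====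
def Spec_lg_pilot_guided_pairing_verdict (responses : List (String × String)) (out : Int × String) : Prop := out = lg_pilot_guided_pairing_verdict_alt responses
instance (responses : List (String × String)) (out : Int × String) : Decidable (Spec_lg_pilot_guided_pairing_verdict responses out) := by unfold Spec_lg_pilot_guided_pairing_verdict; infer_instance

-- ===== CLAIM (what is proved, stated in full; the proofs are below) =====
def Claim_equal_lg_pilot_guided_pairing_verdict : Prop := ∀ (responses : List (String × String)), Dom_lg_pilot_guided_pairing_verdict responses → Spec_lg_pilot_guided_pairing_verdict responses (lg_pilot_guided_pairing_verdict responses)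

-- ===== LEMMAS AND PROOFS =====

-- A's accumulated total equals B's closed-form tally, for any starting accumulator
theorem pv_total_eq (responses : List (String × String)) (t : Int) :
    responses.foldl (fun total p =>
      let key := PySem.Str.lower (PySem.Str.strip p.2)
      if key = "yes" then total + 350
      else if key = "no" then total + (-260)
      else if key = "skip" then total + 0
      else total + 0) t
    = t + ((responses.map (fun p => PySem.Str.lower (PySem.Str.strip p.2))).count "yes" : Int) * 350
        + ((responses.map (fun p => PySem.Str.lower (PySem.Str.strip p.2))).count "no" : Int) * (-260) := by
  induction responses generalizing t with
  | nil => simp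
  | cons p rest ih =>
    simp only [List.foldl_cons, List.map_cons, List.count_cons, ih]
    by_cases hy : PySem.Str.lower (PySem.Str.strip p.2) = "yes"
    · have : ¬ ("no" = PySem.Str.lower (PySem.Str.strip p.2)) := by simp [hy]
      simp [hy, this]; ring
    · have hy' : ¬ ("yes" = PySem.Str.lower (PySem.Str.strip p.2)) := fun h => hy h.symm
      by_cases hn : PySem.Str.lower (PySem.Str.strip p.2) = "no"
      · simp [hy, hn, hy']; ring
      · have hn' : ¬ ("no" = PySem.Str.lower (PySem.Str.strip p.2)) := fun h => hn h.symm
        by_cases hs : PySem.Str.lower (PySem.Str.strip p.2) = "skip" <;>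
          simp [hy, hn, hs, hy', hn']

-- ===== VERDICT (by name: the statement is the Claim_ definition above) =====
theorem lg_pilot_guided_pairing_verdict_spec : Claim_equal_lg_pilot_guided_pairing_verdict := by
  intro responses _
  unfold Spec_lg_pilot_guided_pairing_verdict lg_pilot_guided_pairing_verdict lg_pilot_guided_pairing_verdict_alt
  simp only [pv_total_eq, zero_add]
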